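-- pv_equiv track=rewrite | github.com/degeri/dcr_matrix_rss_bot | reddit.py | split_action_atom
-- ===== SOURCE A (Python) =====
-- MOD_ACTION_FIXES_ATOM = {
--     "approved"      : "approve",
--     "banned"        : "ban",
--     "distinguished" : "distinguish",
--     "edited"        : "edit",
--     "removed"       : "remove",
--     "stickied"      : "sticky",
--     "unstickied"    : "unsticky",
--     "spam"          : "remove",
-- }
--
-- def split_action_atom(ao):
--     action = ao
--     object = ""
--     for wrong, fixed in MOD_ACTION_FIXES_ATOM.items():
--         if ao.startswith(wrong + " "):
--             action = fixed
--             object = ao.replace(wrong + " ", "", 1)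
--             break
--
--     return action, object
-- ===== SOURCE B (Python) =====
-- MOD_ACTION_FIXES_ATOM = {
--     "approved"      : "approve",
--     "banned"        : "ban",
--     "distinguished" : "distinguish",
--     "edited"        : "edit",
--     "removed"       : "remove",
--     "stickied"      : "sticky",
--     "unstickied"    : "unsticky",
--     "spam"          : "remove",
-- }
--
-- def split_action_atom(ao):
--     head, sep, tail = ao.partition(" ")
--     if sep and head in MOD_ACTION_FIXES_ATOM:
--         return MOD_ACTION_FIXES_ATOM[head], tail
--     return ao, ""
-- ===== Notes on version B (the rewrite author's own statement) =====
-- stated objective: simpler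
-- what changed: Replaces A's linear scan over the fix table (one startswith test per key, plus replace on a hit) by a single partition at the first space followed by one direct dict lookup of the head word.
import Mathlib
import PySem

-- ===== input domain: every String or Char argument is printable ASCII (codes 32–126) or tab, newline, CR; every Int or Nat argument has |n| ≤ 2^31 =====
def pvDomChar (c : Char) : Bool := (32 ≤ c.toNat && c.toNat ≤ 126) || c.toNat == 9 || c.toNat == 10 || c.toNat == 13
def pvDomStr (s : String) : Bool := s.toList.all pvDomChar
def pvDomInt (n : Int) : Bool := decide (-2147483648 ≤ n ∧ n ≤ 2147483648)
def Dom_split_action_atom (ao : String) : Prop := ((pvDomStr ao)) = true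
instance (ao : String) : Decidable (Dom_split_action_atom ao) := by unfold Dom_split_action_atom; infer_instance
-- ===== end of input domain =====

-- B replaces A's linear scan over the fix table (startswith per key) by one split at the
-- first space plus a single dict lookup of the head word (objective: simpler).

-- ===== PORT A =====
-- MOD_ACTION_FIXES_ATOM.items() in insertion order, as lists of chars
def modActionFixesAtomItems : List (List Char × List Char) :=
  [ ("approved".toList, "approve".toList)
  , ("banned".toList, "ban".toList)
  , ("distinguished".toList, "distinguish".toList)
  , ("edited".toList, "edit".toList)
  , ("removed".toList, "remove".toList)
  , ("stickied".toList, "sticky".toList)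
  , ("unstickied".toList, "unsticky".toList)
  , ("spam".toList, "remove".toList) ]

-- ao.replace(old, "", 1): remove the FIRST occurrence of old, or leave cs unchanged if
-- absent (exact for new = "" and count 1)
def replaceOnceEmpty (cs old : List Char) : List Char :=
  let i := PySem.Chars.find cs old
  if i = -1 then cs else cs.take i.toNat ++ cs.drop (i.toNat + old.length)

-- the for-loop with break: the first key w with ao.startswith(w + " ") wins
def splitLoopA : List (List Char × List Char) → List Char → List Char × List Char
  | [], cs => (cs, [])
  | (w, f) :: rest, cs =>
    if PySem.Chars.startswith cs (w ++ [' ']) then (f, replaceOnceEmpty cs (w ++ [' ']))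
    else splitLoopA rest cs

def split_action_atom (ao : String) : String × String :=
  let (a, o) := splitLoopA modActionFixesAtomItems ao.toList
  (String.ofList a, String.ofList o)

-- ===== PORT B =====
def modActionFixesAtomDict : PySem.Dict (List Char) (List Char) :=
  PySem.Dict.ofList modActionFixesAtomItems

-- head, sep, tail = ao.partition(" "); if sep and head in dict: (dict[head], tail) else (ao, "").
-- partition on the one-char separator " " is exact as takeWhile/dropWhile at the first space
def split_action_atom_alt (ao : String) : String × String :=
  let cs := ao.toList
  let head := cs.takeWhile (· ≠ ' ')
  let rest := cs.dropWhile (· ≠ ' ')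
  if rest = [] then (ao, "")
  else
    match modActionFixesAtomDict.get? head with
    | some fixed => (String.ofList fixed, String.ofList rest.tail)
    | none => (ao, "")

-- ===== PRECONDITION & SPEC =====
def Spec_split_action_atom (ao : String) (out : String × String) : Prop := out = split_action_atom_alt ao
instance (ao : String) (out : String × String) : Decidable (Spec_split_action_atom ao out) := by unfold Spec_split_action_atom; infer_instance

-- ===== CLAIM (what is proved, stated in full; the proofs are below) =====
def Claim_equal_split_action_atom : Prop := ∀ (ao : String), Dom_split_action_atom ao → Spec_split_action_atom ao (split_action_atom ao)

-- ===== LEMMAS AND PROOFS =====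

-- a space-free key matches A's startswith test iff it is exactly the head word and a space exists
lemma head_decomp (cs w : List Char) (hh : cs.takeWhile (· ≠ ' ') = w)
    (hr : cs.dropWhile (· ≠ ' ') ≠ []) :
    ∃ t, cs = (w ++ [' ']) ++ t ∧ (cs.dropWhile (· ≠ ' ')).tail = t := by
  obtain ⟨x, t, hxt⟩ := List.exists_cons_of_ne_nil hr
  have hx : x = ' ' := by
    have hhd := List.head_dropWhile_not (fun c => decide (c ≠ ' ')) hr
    simp only [hxt, List.head_cons] at hhd
    simpa using hhd
  refine ⟨t, ?_, by rw [hxt]; rfl⟩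
  conv_lhs => rw [← List.takeWhile_append_dropWhile (p := fun c => decide (c ≠ ' ')) (l := cs)]
  rw [hh, hxt, hx]
  simp

lemma startswith_key_iff (cs w : List Char) (hw : ∀ c ∈ w, c ≠ ' ') :
    PySem.Chars.startswith cs (w ++ [' ']) = true ↔
      cs.takeWhile (· ≠ ' ') = w ∧ cs.dropWhile (· ≠ ' ') ≠ [] := by
  rw [PySem.Chars.startswith_iff]
  constructor
  · rintro ⟨t, ht⟩
    subst ht
    have hall : ∀ c ∈ w, (fun c => decide (c ≠ ' ')) c = true := by
      intro c hc; simpa using hw c hc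
    constructor
    · rw [List.append_assoc, List.takeWhile_append_of_pos hall]
      simp
    · rw [List.append_assoc, List.dropWhile_append_of_pos hall]
      simp
  · rintro ⟨hh, hr⟩
    obtain ⟨t, hcs, -⟩ := head_decomp cs w hh hr
    exact ⟨t, hcs.symm⟩

lemma startswith_key_false (cs w : List Char) (hw : ∀ c ∈ w, c ≠ ' ')
    (h : cs.takeWhile (· ≠ ' ') ≠ w ∨ cs.dropWhile (· ≠ ' ') = []) :
    PySem.Chars.startswith cs (w ++ [' ']) = false := by
  rw [Bool.eq_false_iff]
  intro hst
  rcases (startswith_key_iff cs w hw).mp hst with ⟨h1, h2⟩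
  rcases h with h | h
  · exact h h1
  · exact h2 h

-- removing a prefix with replace(old, "", 1) is dropping its length
lemma replaceOnceEmpty_of_prefix (cs p : List Char) (hp : p <+: cs) :
    replaceOnceEmpty cs p = cs.drop p.length := by
  have hinf : p <:+: cs := hp.isInfix
  have h0 : PySem.Chars.find cs p = 0 := by
    have hnn : 0 ≤ PySem.Chars.find cs p := (PySem.Chars.find_nonneg_iff cs p).mpr hinf
    by_contra hne
    have hpos : 0 < (PySem.Chars.find cs p).toNat := by omega
    exact ((PySem.Chars.find_spec (s := cs) (sub := p) hnn).2 0 hpos) (by simpa using hp)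
  simp [replaceOnceEmpty, h0]

-- on a match, A's removed-prefix object is exactly B's tail after the first space
lemma replaceOnceEmpty_eq_tail (cs w : List Char) (hh : cs.takeWhile (· ≠ ' ') = w) (hr : cs.dropWhile (· ≠ ' ') ≠ []) :
    replaceOnceEmpty cs (w ++ [' ']) = (cs.dropWhile (· ≠ ' ')).tail := by
  obtain ⟨t, hcs, htail⟩ := head_decomp cs w hh hr
  rw [replaceOnceEmpty_of_prefix cs (w ++ [' ']) ⟨t, hcs.symm⟩, htail]
  conv_lhs => rw [hcs]
  exact List.drop_left

-- the loop is an association lookup of the head word once a space exists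
lemma splitLoopA_eq_lookup (items : List (List Char × List Char)) (cs : List Char)
    (hkeys : ∀ p ∈ items, ∀ c ∈ p.1, c ≠ ' ') (hr : cs.dropWhile (· ≠ ' ') ≠ []) :
    splitLoopA items cs =
      match (PySem.Dict.mk items).get? (cs.takeWhile (· ≠ ' ')) with
      | some f => (f, (cs.dropWhile (· ≠ ' ')).tail)
      | none => (cs, []) := by
  induction items with
  | nil => simp [splitLoopA, PySem.Dict.get?]
  | cons p rest ih =>
    obtain ⟨w, f⟩ := p
    have hw : ∀ c ∈ w, c ≠ ' ' := hkeys (w, f) List.mem_cons_self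
    rw [PySem.Dict.get?_mk_cons]
    by_cases hh : cs.takeWhile (· ≠ ' ') = w
    · have hst := (startswith_key_iff cs w hw).mpr ⟨hh, hr⟩
      have hbeq : (w == cs.takeWhile (· ≠ ' ')) = true := by simp only [beq_iff_eq]; exact hh.symm
      simp only [splitLoopA, hst, if_true, hbeq]
      rw [replaceOnceEmpty_eq_tail cs w hh hr]
    · have hst := startswith_key_false cs w hw (Or.inl hh)
      have hbeq : (w == cs.takeWhile (· ≠ ' ')) = false := by
        simp only [beq_eq_false_iff_ne, ne_eq]
        exact fun h => hh h.symm
      simp only [splitLoopA, hst, Bool.false_eq_true, if_false, hbeq]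
      exact ih fun q hq => hkeys q (List.mem_cons_of_mem _ hq)

-- without a space no key matches and the loop falls through
lemma splitLoopA_no_space (items : List (List Char × List Char)) (cs : List Char)
    (hkeys : ∀ p ∈ items, ∀ c ∈ p.1, c ≠ ' ') (hr : cs.dropWhile (· ≠ ' ') = []) :
    splitLoopA items cs = (cs, []) := by
  induction items with
  | nil => simp [splitLoopA]
  | cons p rest ih =>
    obtain ⟨w, f⟩ := p
    have hst := startswith_key_false cs w (hkeys (w, f) List.mem_cons_self) (Or.inr hr)
    simp only [splitLoopA, hst, Bool.false_eq_true, if_false]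
    exact ih fun q hq => hkeys q (List.mem_cons_of_mem _ hq)

set_option maxRecDepth 100000 in
lemma dict_eq_mk : modActionFixesAtomDict = PySem.Dict.mk modActionFixesAtomItems := by decide

lemma keys_space_free_bool : (modActionFixesAtomItems.all (fun p => p.1.all (fun c => c != ' '))) = true := by rfl

lemma keys_space_free : ∀ p ∈ modActionFixesAtomItems, ∀ c ∈ p.1, c ≠ ' ' := by
  have h := keys_space_free_bool
  simp only [List.all_eq_true, bne_iff_ne] at h
  exact h

-- ===== VERDICT (by name: the statement is the Claim_ definition above) =====
theorem split_action_atom_spec : Claim_equal_split_action_atom := by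
  intro ao _
  unfold Spec_split_action_atom split_action_atom split_action_atom_alt
  rw [dict_eq_mk]
  by_cases hr : ao.toList.dropWhile (· ≠ ' ') = []
  · rw [splitLoopA_no_space _ _ keys_space_free hr, if_pos hr]
    simp [String.ofList_toList]
  · rw [splitLoopA_eq_lookup _ _ keys_space_free hr, if_neg hr]
    cases hget : (PySem.Dict.mk modActionFixesAtomItems).get? (ao.toList.takeWhile (· ≠ ' ')) with
    | none => simp [String.ofList_toList]
    | some f => simp
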